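-- pv_equiv track=rewrite | github.com/jwparsons/DeepReads | goodreads_genre_and_rating_data.py | description_filter
-- ===== SOURCE A (Python) =====
-- import string
--
-- def description_filter(description):
--     # remove html
--     filter_1 = ''
--     is_open = False
--     for i in range(len(description)):
--         letter = description[i]
--         if is_open:
--             if letter == '>':
--                 is_open = False
--                 filter_1 += ' '
--         else:
--             if letter == '<':
--                 is_open = True
--             else:
--                 filter_1 += letter
--
--     # check for any crazy characters
--     filter_2 = ''
--     for i in range(len(filter_1)):
--         letter = filter_1[i]
--         if letter.isalpha():
--             filter_2 += letter
--         else: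
--             if letter in string.punctuation or letter == ' ':
--                 filter_2 += letter
--             else:
--                 filter_2 += ' '
--
--     # remove multiple white space and .com's
--     word_split = filter_2.split()
--     word_filter = []
--     for word in word_split:
--         if '.com' in word:
--             continue
--         else:
--             word_filter.append(word)
--     filter_3 = ' '.join(word_filter)
--
--     return filter_3
-- ===== SOURCE B (Python) =====
-- import string
--
-- def description_filter(description):
--     # strip tags by jumping from '<' to the matching '>' with find, instead of a char state machine
--     parts = []
--     s = description
--     while True:
--         i = s.find('<')
--         if i < 0:
--             parts.append(s)
--             break
--         parts.append(s[:i])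
--         j = s.find('>', i + 1)
--         if j < 0:
--             break
--         parts.append(' ')
--         s = s[j + 1:]
--     text = ''.join(parts)
--     cleaned = ''.join(c if c.isalpha() or c in string.punctuation or c == ' ' else ' '
--                       for c in text)
--     return ' '.join(w for w in cleaned.split() if '.com' not in w)
-- ===== Notes on version B (the rewrite author's own statement) =====
-- stated objective: idiomatic
-- what changed: A's char-by-char open/close tag state machine is replaced by find-based jumps from each opening angle bracket to its matching closing one, collecting the kept slices, and the character-classification and word-filter accumulator loops become map/filter comprehensions over a single split/join pipeline.
import Mathlib
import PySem

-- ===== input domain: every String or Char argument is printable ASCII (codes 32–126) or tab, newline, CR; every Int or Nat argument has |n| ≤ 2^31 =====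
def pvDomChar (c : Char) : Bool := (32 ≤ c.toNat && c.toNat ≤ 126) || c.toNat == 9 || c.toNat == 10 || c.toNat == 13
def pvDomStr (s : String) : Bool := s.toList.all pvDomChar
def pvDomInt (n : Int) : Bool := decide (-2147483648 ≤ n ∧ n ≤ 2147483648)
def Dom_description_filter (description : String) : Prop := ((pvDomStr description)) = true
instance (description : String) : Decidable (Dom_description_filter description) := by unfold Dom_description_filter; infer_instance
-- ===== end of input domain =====

-- B replaces A's char-by-char open/close tag state machine with find-based jumps from '<'
-- to the matching '>', and folds the remaining passes into map/filter pipelines (objective: idiomatic).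

-- string.punctuation
def pvPunct : List Char := "!\"#$%&'()*+,-./:;<=>?@[\\]^_`{|}~".toList

-- ===== PORT A =====
def description_filter (description : String) : String :=
  -- remove html: state machine over the characters, state = (is_open, filter_1)
  let filter_1 := (description.toList.foldl
    (fun (st : Bool × List Char) letter =>
      if st.1 then
        if letter = '>' then (false, st.2 ++ [' ']) else (true, st.2)
      else
        if letter = '<' then (true, st.2) else (false, st.2 ++ [letter]))
    (false, [])).2
  -- check for any crazy characters
  let filter_2 := filter_1.foldl
    (fun acc letter =>
      if PySem.Chars.isalpha letter then acc ++ [letter]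
      else if pvPunct.contains letter || letter = ' ' then acc ++ [letter]
      else acc ++ [' '])
    []
  -- remove multiple white space and .com's
  let word_split := PySem.Chars.split₀ filter_2
  let word_filter := word_split.foldl
    (fun wf word => if PySem.Chars.isIn ".com".toList word then wf else wf ++ [word]) []
  String.ofList (PySem.Chars.join [' '] word_filter)

-- ===== PORT B =====
-- the while-loop of B: jump from '<' to the matching '>' with find, collecting the parts
def bStrip (s : List Char) : List (List Char) :=
  let i := PySem.Chars.find s ['<']
  if hi : i < 0 then [s]
  else
    let j := PySem.Chars.findFrom s ['>'] (i + 1) none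
    if j < 0 then [s.take i.toNat]
    else s.take i.toNat :: [' '] :: bStrip (s.drop (j.toNat + 1))
termination_by s.length
decreasing_by
  have h0 : 0 ≤ PySem.Chars.find s ['<'] := by omega
  have hinf := (PySem.Chars.find_nonneg_iff s ['<']).mp h0
  have hne : s ≠ [] := by
    intro h; subst h
    simpa using hinf.sublist.length_le
  simp only [List.length_drop]
  have : 0 < s.length := List.length_pos_iff.mpr hne
  omega

def description_filter_alt (description : String) : String :=
  let text := (bStrip description.toList).flatten
  let cleaned := text.map
    (fun c => if PySem.Chars.isalpha c || pvPunct.contains c || c = ' ' then c else ' ')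
  String.ofList (PySem.Chars.join [' ']
    ((PySem.Chars.split₀ cleaned).filter (fun w => !PySem.Chars.isIn ".com".toList w)))

-- ===== PRECONDITION & SPEC =====
def Spec_description_filter (description : String) (out : String) : Prop := out = description_filter_alt description
instance (description : String) (out : String) : Decidable (Spec_description_filter description out) := by unfold Spec_description_filter; infer_instance

-- ===== CLAIM (what is proved, stated in full; the proofs are below) =====
def Claim_equal_description_filter : Prop := ∀ (description : String), Dom_description_filter description → Spec_description_filter description (description_filter description)

-- ===== LEMMAS AND PROOFS =====

-- reference recursive form of A's tag-stripping state machine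
def strip : List Char → Bool → List Char
  | [], _ => []
  | c :: rest, true => if c = '>' then ' ' :: strip rest false else strip rest true
  | c :: rest, false => if c = '<' then strip rest true else c :: strip rest false

theorem foldl_strip (s : List Char) : ∀ (b : Bool) (acc : List Char),
    (s.foldl (fun (st : Bool × List Char) letter =>
      if st.1 then
        if letter = '>' then (false, st.2 ++ [' ']) else (true, st.2)
      else
        if letter = '<' then (true, st.2) else (false, st.2 ++ [letter])) (b, acc)).2
    = acc ++ strip s b := by
  induction s with
  | nil => intro b acc; simp [strip]
  | cons c rest ih =>
    intro b acc
    cases b <;> by_cases h : c = '>' <;> by_cases h2 : c = '<' <;>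
      simp_all [strip]

theorem strip_no_open (s : List Char) (h : '<' ∉ s) : strip s false = s := by
  induction s with
  | nil => rfl
  | cons c rest ih =>
    simp only [List.mem_cons, not_or] at h
    simp [strip, Ne.symm h.1, ih h.2]

theorem strip_no_close (s : List Char) (h : '>' ∉ s) : strip s true = [] := by
  induction s with
  | nil => rfl
  | cons c rest ih =>
    simp only [List.mem_cons, not_or] at h
    simp [strip, Ne.symm h.1, ih h.2]

theorem strip_append_open (p : List Char) (h : '<' ∉ p) (r : List Char) :
    strip (p ++ '<' :: r) false = p ++ strip r true := by
  induction p with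
  | nil => simp [strip]
  | cons c rest ih =>
    simp only [List.mem_cons, not_or] at h
    simp [strip, Ne.symm h.1, ih h.2]

theorem strip_append_close (p : List Char) (h : '>' ∉ p) (r : List Char) :
    strip (p ++ '>' :: r) true = ' ' :: strip r false := by
  induction p with
  | nil => simp [strip]
  | cons c rest ih =>
    simp only [List.mem_cons, not_or] at h
    simp [strip, Ne.symm h.1, ih h.2]

-- the minimality clause of find means the prefix before the hit is free of the character
theorem not_mem_take_of_min (s : List Char) (c : Char) (n : Nat) (hn : n ≤ s.length)
    (h : ∀ k < n, ¬ [c] <+: s.drop k) : c ∉ s.take n := by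
  intro hc
  obtain ⟨k, hk, hget⟩ := List.getElem_of_mem hc
  have hk' : k < n := (by simpa using hk : k < n ∧ k < s.length).1
  have hkl : k < s.length := lt_of_lt_of_le hk' hn
  apply h k hk'
  rw [List.getElem_take] at hget
  rw [List.drop_eq_getElem_cons hkl, hget]
  exact ⟨_, rfl⟩

theorem singleton_infix_of_mem {c : Char} {s : List Char} (h : c ∈ s) : [c] <:+: s := by
  obtain ⟨t, u, ht⟩ := List.append_of_mem h
  exact ⟨t, u, by simp [ht]⟩

theorem bStrip_flatten (s : List Char) : (bStrip s).flatten = strip s false := by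
  induction hn : s.length using Nat.strong_induction_on generalizing s with
  | _ n ih =>
  rw [bStrip]
  by_cases hi : PySem.Chars.find s ['<'] < 0
  · -- no '<' in s
    have hninf : ¬ (['<'] <:+: s) := by
      intro h; exact absurd ((PySem.Chars.find_nonneg_iff s ['<']).mpr h) (by omega)
    have hmem : '<' ∉ s := fun hm => hninf (singleton_infix_of_mem hm)
    simp [hi, strip_no_open s hmem]
  · have h0 : 0 ≤ PySem.Chars.find s ['<'] := by omega
    obtain ⟨hpre, hmin⟩ := PySem.Chars.find_spec h0
    set i : Nat := (PySem.Chars.find s ['<']).toNat with hidef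
    have hil : i < s.length := by
      by_contra hge
      rw [List.drop_eq_nil_of_le (by omega)] at hpre
      simpa using hpre.length_le
    have hdrop : s.drop i = '<' :: s.drop (i + 1) := by
      obtain ⟨t, ht⟩ := hpre
      have h1 : (s.drop i).head? = some '<' := by rw [← ht]; rfl
      rw [List.drop_eq_getElem_cons hil] at h1 ⊢
      simp only [List.head?_cons, Option.some.injEq] at h1
      rw [h1]
    have hsplit : s = s.take i ++ '<' :: s.drop (i + 1) := by
      conv_lhs => rw [← List.take_append_drop i s]
      rw [hdrop]
    have hnpre : '<' ∉ s.take i := not_mem_take_of_min s '<' i (le_of_lt hil) hmin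
    have hcast : PySem.Chars.find s ['<'] + 1 = ((i + 1 : Nat) : Int) := by omega
    rw [dif_neg hi, hcast, PySem.Chars.findFrom_natCast s ['>'] (i+1) (by omega)]
    set r : List Char := s.drop (i + 1) with hrdef
    by_cases hj : PySem.Chars.find r ['>'] = -1
    · -- no '>' after the first '<'
      have hninf : ¬ (['>'] <:+: r) := (PySem.Chars.find_eq_neg_one_iff r ['>']).mp hj
      have hmem : '>' ∉ r := fun hm => hninf (singleton_infix_of_mem hm)
      rw [if_pos hj, if_pos (by norm_num : (-1:Int) < 0)]
      conv_rhs => rw [hsplit]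
      rw [strip_append_open _ hnpre, strip_no_close r hmem]
      simp
    · have hj0 : 0 ≤ PySem.Chars.find r ['>'] := by
        have := PySem.Chars.neg_one_le_find (s := r) (sub := ['>'])
        omega
      obtain ⟨hpre2, hmin2⟩ := PySem.Chars.find_spec hj0
      set m : Nat := (PySem.Chars.find r ['>']).toNat with hmdef
      have hml : m < r.length := by
        by_contra hge
        rw [List.drop_eq_nil_of_le (by omega)] at hpre2
        simpa using hpre2.length_le
      have hdrop2 : r.drop m = '>' :: r.drop (m + 1) := by
        obtain ⟨t, ht⟩ := hpre2
        have h1 : (r.drop m).head? = some '>' := by rw [← ht]; rfl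
        rw [List.drop_eq_getElem_cons hml] at h1 ⊢
        simp only [List.head?_cons, Option.some.injEq] at h1
        rw [h1]
      have hsplit2 : r = r.take m ++ '>' :: r.drop (m + 1) := by
        conv_lhs => rw [← List.take_append_drop m r]
        rw [hdrop2]
      have hnpre2 : '>' ∉ r.take m := not_mem_take_of_min r '>' m (le_of_lt hml) hmin2
      have hjpos : ¬ (((i + 1 : Nat) : Int) + PySem.Chars.find r ['>'] < 0) := by omega
      rw [if_neg hj, if_neg hjpos]
      have htonat : ((((i + 1 : Nat) : Int)) + PySem.Chars.find r ['>']).toNat + 1 = i + 1 + (m + 1) := by omega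
      rw [htonat, ← List.drop_drop]
      have hrlen : r.length = s.length - (i + 1) := by rw [hrdef, List.length_drop]
      have ihlt : (r.drop (m + 1)).length < n := by
        rw [List.length_drop]
        omega
      rw [List.flatten_cons, List.flatten_cons, ih _ ihlt (r.drop (m+1)) rfl]
      conv_rhs => rw [hsplit]
      rw [strip_append_open _ hnpre]
      conv_rhs => rw [hsplit2]
      rw [strip_append_close _ hnpre2]
      simp

-- ===== VERDICT (by name: the statement is the Claim_ definition above) =====
theorem description_filter_spec : Claim_equal_description_filter := by
  intro description _
  unfold Spec_description_filter description_filter description_filter_alt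
  rw [foldl_strip, ← bStrip_flatten]
  simp only [List.nil_append]
  congr 1
  have hfun : (fun (acc : List Char) letter =>
      if PySem.Chars.isalpha letter then acc ++ [letter]
      else if pvPunct.contains letter || letter = ' ' then acc ++ [letter]
      else acc ++ [' '])
      = (fun (acc : List Char) c =>
        acc ++ [if PySem.Chars.isalpha c || pvPunct.contains c || c = ' ' then c else ' ']) := by
    funext acc c
    by_cases ha : PySem.Chars.isalpha c <;>
      by_cases hb : (pvPunct.contains c || c = ' ') = true <;> simp_all
  rw [hfun, PySem.List.foldl_append_singleton_eq_map, List.nil_append]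
  have hfun2 : (fun (wf : List (List Char)) word =>
      if PySem.Chars.isIn ".com".toList word then wf else wf ++ [word])
      = (fun (acc : List (List Char)) x =>
        if (!PySem.Chars.isIn ".com".toList x) then acc ++ [(fun w => w) x] else acc) := by
    funext wf word
    cases hc : PySem.Chars.isIn ".com".toList word <;> simp_all
  rw [hfun2, PySem.List.foldl_append_if, List.nil_append]
  congr 1
  exact (List.map_id _)
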